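-- pv_equiv track=rewrite | github.com/jogecodes/BIBMH | P1/patata.py | torneo
-- ===== SOURCE A (Python) =====
-- def torneo(genes, p):
--     ganadores = genes.copy()
--
--     while len(ganadores) > p:
--         #  nos aseguramos de que sea divisible entre p
--         while len(ganadores) % p != 0:
--             ganador =  max(ganadores[0], ganadores[1])
--             ganadores = ganadores[2:]
--             ganadores = [ganador] + ganadores
--
--         # inicializamos finalistas
--         finalistas = []
--         # t de cada subset
--         t_subset = len(ganadores)//p
--         # creamos los subsets
--         for i in range(0,len(ganadores), t_subset):
--             subset = ganadores[i:i+t_subset]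
--             while len(subset) != 1:
--                 ronda = []
--                 if len(subset) % 2 != 0:
--                     ganador =  max(subset[0], subset[1])
--                     subset = subset[2:]
--                     subset = [ganador] + subset
--
--                 for j in range(0, len(subset), 2):
--                     ganador =  max(subset[j], subset[j+1])
--                     ronda.append(ganador)
--                 subset = ronda
--             finalistas = finalistas + subset
--
--         ganadores = finalistas
--
--     return ganadores
-- ===== SOURCE B (Python) =====
-- def torneo(genes, p):
--     # Single pass: A's prefix merging folds the first n%p+1 elements into one,
--     # then each of the p equal blocks of the merged list reduces to its maximum.
--     n = len(genes)
--     if n <= p: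
--         return list(genes)
--     t, r = divmod(n, p)
--     return [max(genes[:r + t])] + [max(genes[r + i * t : r + (i + 1) * t]) for i in range(1, p)]
-- ===== Notes on version B (the rewrite author's own statement) =====
-- stated objective: faster
-- what changed: A simulates the whole tournament with repeated list slicing (prefix pair-merges until divisibility, then round-by-round pairwise eliminations per subset); B computes the same result in one pass as [max(genes[:r+t])] plus the maxima of the p-1 remaining equal blocks, since each subset tournament just returns the block maximum.
import Mathlib
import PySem

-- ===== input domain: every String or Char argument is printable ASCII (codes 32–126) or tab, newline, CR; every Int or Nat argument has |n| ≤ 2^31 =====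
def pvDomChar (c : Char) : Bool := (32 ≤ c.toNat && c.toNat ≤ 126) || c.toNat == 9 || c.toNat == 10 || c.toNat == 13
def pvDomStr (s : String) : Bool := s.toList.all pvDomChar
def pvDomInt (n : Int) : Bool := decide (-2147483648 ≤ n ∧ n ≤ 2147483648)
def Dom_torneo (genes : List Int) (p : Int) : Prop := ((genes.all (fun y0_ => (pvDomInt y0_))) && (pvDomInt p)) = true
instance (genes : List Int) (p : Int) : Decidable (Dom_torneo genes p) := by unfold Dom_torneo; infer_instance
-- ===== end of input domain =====

-- B replaces A's tournament simulation (repeated list slicing) by a single pass taking block maxima directly; measured asymptotically faster.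


-- ===== PORT A =====
-- inner 'while len(ganadores) % p != 0' loop: merge the first two elements into their max
def pvMergeLoop (p : Int) (xs : List Int) : List Int :=
  if PySem.Int.mod (xs.length : Int) p ≠ 0 then
    match xs with
    | a :: b :: rest => pvMergeLoop p (max a b :: rest)
    | _ => xs  -- Python raises IndexError here (len < 2); unreachable under Pre_
  else xs
termination_by xs.length
decreasing_by simp_all

-- 'for j in range(0, len(subset), 2): ronda.append(max(subset[j], subset[j+1]))'
-- (called only on even-length lists; on an odd tail Python raises IndexError — unreachable)
def pvRonda : List Int → List Int
  | a :: b :: rest => max a b :: pvRonda rest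
  | _ => []

-- 'while len(subset) != 1' tournament loop of A
def pvSubset (xs : List Int) : List Int :=
  if xs.length ≠ 1 then
    let ys := if xs.length % 2 ≠ 0 then
        match xs with
        | a :: b :: rest => max a b :: rest
        | _ => xs  -- IndexError in Python; unreachable under Pre_
      else xs
    let r := pvRonda ys
    if h : r.length < xs.length then pvSubset r else r  -- totality guard; always taken under Pre_
  else xs
termination_by xs.length
decreasing_by exact h

-- 'for i in range(0, len(ganadores), t_subset): … finalistas = finalistas + subset'
def pvChunks (t : Nat) : List Int → List Int
  | [] => []
  | x :: l =>
    if ht : 0 < t then pvSubset ((x :: l).take t) ++ pvChunks t ((x :: l).drop t)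
    else []  -- Python: range step 0 raises ValueError; unreachable under Pre_
termination_by xs => xs.length
decreasing_by simp only [List.length_drop, List.length_cons]; omega

-- outer 'while len(ganadores) > p' loop
def pvOuter (p : Int) (xs : List Int) : List Int :=
  if ((xs.length : Int)) > p then
    let ys := pvMergeLoop p xs
    let t := PySem.Int.floordiv (ys.length : Int) p
    let fin := pvChunks t.toNat ys
    if h : fin.length < xs.length then pvOuter p fin else fin  -- totality guard; always taken under Pre_
  else xs
termination_by xs.length
decreasing_by exact h

def torneo (genes : List Int) (p : Int) : List Int :=
  pvOuter p genes  -- ganadores = genes.copy()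

-- ===== PORT B =====
-- max(xs) for nonempty xs (the 0 default is never consulted under Pre_)
def pvMaxOf (xs : List Int) : Int := (PySem.List.max? xs (fun y => y)).getD 0

def torneo_alt (genes : List Int) (p : Int) : List Int :=
  let n : Int := genes.length
  if n ≤ p then genes
  else
    let t := PySem.Int.floordiv n p
    let r := PySem.Int.mod n p
    pvMaxOf (PySem.List.slice genes none (some (r + t))) ::
      (PySem.List.pyRange 1 p 1).map
        (fun i => pvMaxOf (PySem.List.slice genes (some (r + i * t)) (some (r + (i + 1) * t))))

-- ===== PRECONDITION & SPEC =====
-- Pre_ admits exactly the inputs on which A returns: for p ≤ 0, A raises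
-- (ZeroDivisionError at 'len % p' for p = 0, ValueError at 'range(…, step 0)' for p < 0),
-- except the single returning case genes = [] with p = 0, which Pre_ keeps.
def Pre_torneo (genes : List Int) (p : Int) : Prop := 1 ≤ p ∨ (genes = [] ∧ p = 0)
instance (genes : List Int) (p : Int) : Decidable (Pre_torneo genes p) := by unfold Pre_torneo; infer_instance
def pvWitness_torneo : List Int × Int := ([3, 1, 4, 1, 5], 2)

def Spec_torneo (genes : List Int) (p : Int) (out : List Int) : Prop := out = torneo_alt genes p
instance (genes : List Int) (p : Int) (out : List Int) : Decidable (Spec_torneo genes p out) := by unfold Spec_torneo; infer_instance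

-- ===== CLAIM (what is proved, stated in full; the proofs are below) =====
def Claim_equal_torneo : Prop := ∀ (genes : List Int) (p : Int), Dom_torneo genes p → Pre_torneo genes p → Spec_torneo genes p (torneo genes p)

-- ===== LEMMAS AND PROOFS =====

-- max of a nonempty list as A's running fold produces it
def maxL : List Int → Int
  | [] => 0
  | a :: l => l.foldl max a

theorem pvMaxOf_eq_maxL (xs : List Int) (h : xs ≠ []) : pvMaxOf xs = maxL xs := by
  obtain ⟨a, l, rfl⟩ := List.exists_cons_of_ne_nil h
  simp [pvMaxOf, maxL, PySem.List.max?_id_cons]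

theorem maxL_cons_maxL (u w : List Int) (h : u ≠ []) :
    maxL (maxL u :: w) = maxL (u ++ w) := by
  obtain ⟨a, l, rfl⟩ := List.exists_cons_of_ne_nil h
  simp [maxL, List.foldl_append]

-- unfolding lemmas for the while-loop ports
theorem pvMergeLoop_stop (p : Int) (xs : List Int)
    (h : PySem.Int.mod (xs.length : Int) p = 0) : pvMergeLoop p xs = xs := by
  rw [pvMergeLoop.eq_def, if_neg (by simpa using h)]

theorem pvMergeLoop_step (p : Int) (a b : Int) (rest : List Int)
    (h : PySem.Int.mod (((a :: b :: rest).length : Int)) p ≠ 0) :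
    pvMergeLoop p (a :: b :: rest) = pvMergeLoop p (max a b :: rest) := by
  rw [pvMergeLoop.eq_def, if_pos h]

theorem pvSubset_one (a : Int) : pvSubset [a] = [a] := by
  rw [pvSubset.eq_def, if_neg (by simp)]

theorem pvSubset_even (xs : List Int) (h1 : xs.length ≠ 1) (hpar : xs.length % 2 = 0)
    (hlt : (pvRonda xs).length < xs.length) :
    pvSubset xs = pvSubset (pvRonda xs) := by
  rw [pvSubset.eq_def, if_pos h1, if_neg (by simpa using hpar)]
  simp only []
  rw [dif_pos hlt]

theorem pvSubset_odd (a b : Int) (rest : List Int) (h1 : (a :: b :: rest).length ≠ 1)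
    (hpar : (a :: b :: rest).length % 2 ≠ 0)
    (hlt : (pvRonda (max a b :: rest)).length < (a :: b :: rest).length) :
    pvSubset (a :: b :: rest) = pvSubset (pvRonda (max a b :: rest)) := by
  rw [pvSubset.eq_def, if_pos h1, if_pos hpar]
  simp only []
  rw [dif_pos hlt]

theorem pvChunks_cons (t : Nat) (ht : 0 < t) (x : Int) (l : List Int) :
    pvChunks t (x :: l) = pvSubset ((x :: l).take t) ++ pvChunks t ((x :: l).drop t) := by
  rw [pvChunks.eq_def]; simp [ht]

theorem pvOuter_stop (p : Int) (xs : List Int) (h : ¬ ((xs.length : Int) > p)) :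
    pvOuter p xs = xs := by
  rw [pvOuter.eq_def]; simp [h]

theorem pvOuter_step (p : Int) (xs : List Int) (hgt : (xs.length : Int) > p)
    (hlt : (pvChunks (PySem.Int.floordiv ((pvMergeLoop p xs).length : Int) p).toNat
              (pvMergeLoop p xs)).length < xs.length) :
    pvOuter p xs =
      pvOuter p (pvChunks (PySem.Int.floordiv ((pvMergeLoop p xs).length : Int) p).toNat
        (pvMergeLoop p xs)) := by
  rw [pvOuter.eq_def, if_pos hgt]
  simp only []
  rw [dif_pos hlt]

theorem merge_lemma (p : Int) (hp : 1 ≤ p) :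
    ∀ (r : Nat) (xs : List Int), p ≤ (xs.length : Int) → xs.length % p.toNat = r →
      pvMergeLoop p xs = maxL (xs.take (r + 1)) :: xs.drop (r + 1) := by
  intro r
  induction r with
  | zero =>
    intro xs hlen hmod
    have hxs : xs ≠ [] := by rintro rfl; simp at hlen; omega
    obtain ⟨a, l, rfl⟩ := List.exists_cons_of_ne_nil hxs
    have hpt : ((p.toNat : Int)) = p := by omega
    rw [pvMergeLoop_stop]
    · simp [maxL]
    · rw [← hpt, PySem.Int.mod_natCast, hmod]; rfl
  | succ r ih =>
    intro xs hlen hmod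
    have hpn : 0 < p.toNat := by omega
    have hpt : ((p.toNat : Int)) = p := by omega
    have hne : xs.length ≠ p.toNat := by
      intro h; rw [h, Nat.mod_self] at hmod; omega
    have hgt : p.toNat < xs.length := by omega
    have h2 : 2 ≤ xs.length := by omega
    obtain ⟨a, l, rfl⟩ := List.exists_cons_of_ne_nil
      (show xs ≠ [] by intro h; rw [h] at h2; simp at h2)
    obtain ⟨b, rest, rfl⟩ := List.exists_cons_of_ne_nil
      (show l ≠ [] by intro h; rw [h] at h2; simp at h2)
    rw [pvMergeLoop_step p a b rest (by rw [← hpt, PySem.Int.mod_natCast, hmod]; omega)]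
    have hq : (a :: b :: rest).length = p.toNat * ((a :: b :: rest).length / p.toNat) + (r + 1) := by
      rw [← hmod]; exact (Nat.div_add_mod _ _).symm
    have hrlt : r + 1 < p.toNat := hmod ▸ Nat.mod_lt _ hpn
    have hL' : (max a b :: rest).length = r + ((a :: b :: rest).length / p.toNat) * p.toNat := by
      generalize hm : (a :: b :: rest).length / p.toNat = q at hq ⊢
      generalize hmm : p.toNat * q = m at hq
      rw [Nat.mul_comm, hmm]
      simp only [List.length_cons] at hq ⊢
      omega
    have hmod' : (max a b :: rest).length % p.toNat = r := by
      rw [hL', Nat.add_mul_mod_self_right, Nat.mod_eq_of_lt (by omega)]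
    have hlen' : p ≤ ((max a b :: rest).length : Int) := by
      simp only [List.length_cons] at hgt ⊢
      omega
    rw [ih (max a b :: rest) hlen' hmod']
    simp [maxL, List.foldl]

theorem ronda_len (l : List Int) : (pvRonda l).length = l.length / 2 := by
  induction l using pvRonda.induct with
  | case1 a b rest ih => simp [pvRonda, ih]; omega
  | case2 xs h =>
    cases xs with
    | nil => simp [pvRonda]
    | cons a l =>
      cases l with
      | nil => simp [pvRonda]
      | cons b r => exact absurd rfl (h a b r)

theorem foldl_max_ronda : ∀ (l : List Int), l.length % 2 = 0 → ∀ a : Int,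
    (pvRonda l).foldl max a = l.foldl max a := by
  intro l
  induction l using pvRonda.induct with
  | case1 x y rest ih =>
    intro hev a
    simp only [List.length_cons] at hev
    have : rest.length % 2 = 0 := by omega
    simp [pvRonda, List.foldl, ih this, max_assoc]
  | case2 xs h =>
    intro hev a
    cases xs with
    | nil => simp [pvRonda]
    | cons x l =>
      cases l with
      | nil => simp at hev
      | cons y r => exact absurd rfl (h x y r)

theorem ronda_maxL (u b : Int) (rest : List Int) (hev : rest.length % 2 = 0) :
    maxL (pvRonda (u :: b :: rest)) = maxL (u :: b :: rest) := by
  show maxL (max u b :: pvRonda rest) = maxL (u :: b :: rest)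
  simp only [maxL]
  rw [foldl_max_ronda rest hev]
  simp [List.foldl]

theorem subset_spec : ∀ (xs : List Int), xs ≠ [] → pvSubset xs = [maxL xs] := by
  intro xs
  induction hn : xs.length using Nat.strong_induction_on generalizing xs with
  | _ n ih =>
  intro hne
  obtain ⟨a, l, rfl⟩ := List.exists_cons_of_ne_nil hne
  by_cases h1 : (a :: l).length = 1
  · have : l = [] := by simpa using h1
    subst this
    rw [pvSubset_one]; simp [maxL]
  · obtain ⟨b, rest, rfl⟩ : ∃ b rest, l = b :: rest := by
      cases l with
      | nil => simp at h1
      | cons b rest => exact ⟨b, rest, rfl⟩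
    by_cases hpar : (a :: b :: rest).length % 2 = 0
    · -- even length round
      have hev : rest.length % 2 = 0 := by simp at hpar ⊢; omega
      have hrl : (pvRonda (a :: b :: rest)).length = (rest.length + 2) / 2 := by
        rw [ronda_len]; simp only [List.length_cons]
      have hrne : pvRonda (a :: b :: rest) ≠ [] := by
        intro h; rw [h] at hrl; simp only [List.length_nil] at hrl; omega
      have hlt : (pvRonda (a :: b :: rest)).length < (a :: b :: rest).length := by
        rw [hrl]; simp only [List.length_cons]; omega
      rw [pvSubset_even _ h1 hpar hlt]
      rw [ih _ (by rw [← hn]; exact hlt) _ rfl hrne]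
      rw [ronda_maxL _ _ _ hev]
    · -- odd length: merge first two, then even round
      have hev' : rest.length % 2 ≠ 0 := by simp at hpar ⊢; omega
      cases rest with
      | nil => simp at hev'
      | cons c rest' =>
        have hev2 : rest'.length % 2 = 0 := by simp at hev' ⊢; omega
        have hrl : (pvRonda (max a b :: c :: rest')).length = (rest'.length + 2) / 2 := by
          rw [ronda_len]; simp only [List.length_cons]
        have hrne : pvRonda (max a b :: c :: rest') ≠ [] := by
          intro h; rw [h] at hrl; simp only [List.length_nil] at hrl; omega
        have hlt : (pvRonda (max a b :: c :: rest')).length < (a :: b :: c :: rest').length := by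
          rw [hrl]; simp only [List.length_cons]; omega
        rw [pvSubset_odd _ _ _ h1 hpar hlt]
        rw [ih _ (by rw [← hn]; exact hlt) _ rfl hrne]
        rw [ronda_maxL _ _ _ hev2]
        simp [maxL, List.foldl]

theorem chunks_eq : ∀ (k t : Nat), 0 < t → ∀ v : List Int, v.length = k * t →
    pvChunks t v = (List.range k).map (fun i => maxL ((v.drop (i * t)).take t)) := by
  intro k
  induction k with
  | zero =>
    intro t ht v hv
    have : v = [] := List.eq_nil_of_length_eq_zero (by simpa using hv)
    subst this; simp [pvChunks]
  | succ k ih =>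
    intro t ht v hv
    have hvne : v ≠ [] := by
      intro h; subst h; simp at hv; omega
    obtain ⟨a, l, rfl⟩ := List.exists_cons_of_ne_nil hvne
    rw [pvChunks_cons t ht]
    have htake : (a :: l).take t ≠ [] := by
      cases t with
      | zero => omega
      | succ t' => simp [List.take]
    rw [subset_spec _ htake]
    have hdrop : ((a :: l).drop t).length = k * t := by
      have hexp : (k + 1) * t = k * t + t := by ring
      rw [hexp] at hv
      simp only [List.length_drop]
      generalize k * t = m at hv ⊢
      omega
    rw [ih t ht _ hdrop]
    rw [List.range_succ_eq_map]
    simp only [List.map_cons, List.map_map, Nat.zero_mul, List.drop_zero]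
    refine congrArg₂ List.cons rfl ?_
    apply List.map_congr_left
    intro i hi
    simp [Function.comp_apply, List.drop_drop, Nat.succ_mul, Nat.add_comm]

theorem torneo_core (g : List Int) (pn : Nat) (hp : 1 ≤ pn)
    (hgt : (pn : Int) < (g.length : Int)) :
    torneo g (pn : Int) = torneo_alt g (pn : Int) := by
  have hp' : (1 : Int) ≤ (pn : Int) := by exact_mod_cast hp
  have hpn0 : 0 < pn := hp
  have hnpos : pn < g.length := by exact_mod_cast hgt
  set n := g.length with hn
  set r := n % pn with hrdef
  set t := n / pn with htdef
  have ht1 : 1 ≤ t := (Nat.one_le_div_iff hpn0).mpr (le_of_lt hnpos)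
  have hr : r < pn := Nat.mod_lt _ hpn0
  have hdm : pn * t + r = n := Nat.div_add_mod n pn
  have hrn : r + 1 ≤ n := by omega
  have hmerge : pvMergeLoop (pn : Int) g = maxL (g.take (r + 1)) :: g.drop (r + 1) := by
    refine merge_lemma (pn : Int) hp' r g (le_of_lt hgt) ?_
    simp [hrdef, hn]
  set ys := maxL (g.take (r + 1)) :: g.drop (r + 1) with hys
  have hyslen : ys.length = pn * t := by
    rw [hys]
    simp only [List.length_cons, List.length_drop, ← hn]
    generalize hdm2 : pn * t = m at hdm ⊢
    omega
  have hfd : (PySem.Int.floordiv ((ys.length : Nat) : Int) (pn : Int)).toNat = t := by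
    rw [hyslen, PySem.Int.floordiv_natCast]
    simp [Nat.mul_div_cancel_left _ hpn0]
  have hchunks : pvChunks t ys = (List.range pn).map (fun i => maxL ((ys.drop (i * t)).take t)) :=
    chunks_eq pn t ht1 ys hyslen
  have hbig : pvChunks (PySem.Int.floordiv (((pvMergeLoop (pn : Int) g).length : Nat) : Int) (pn : Int)).toNat
      (pvMergeLoop (pn : Int) g) = (List.range pn).map (fun i => maxL ((ys.drop (i * t)).take t)) := by
    rw [hmerge, hfd, hchunks]
  have hA : torneo g (pn : Int) = (List.range pn).map (fun i => maxL ((ys.drop (i * t)).take t)) := by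
    show pvOuter (pn : Int) g = _
    rw [pvOuter_step (pn : Int) g (by exact_mod_cast hgt) (by rw [hbig]; simp; omega)]
    rw [hbig, pvOuter_stop _ _ (by simp)]
  rw [hA]
  -- B side
  show _ = torneo_alt g (pn : Int)
  rw [torneo_alt]
  rw [if_neg (by rw [← hn]; omega)]
  simp only []
  have hfdI : PySem.Int.floordiv ((n : Nat) : Int) (pn : Int) = (t : Int) := by
    rw [PySem.Int.floordiv_natCast, htdef]
  have hmdI : PySem.Int.mod ((n : Nat) : Int) (pn : Int) = (r : Int) := by
    rw [PySem.Int.mod_natCast, hrdef]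
  rw [← hn, hfdI, hmdI]
  -- split range pn = 0 :: succs
  obtain ⟨pm, rfl⟩ : ∃ pm, pn = pm + 1 := ⟨pn - 1, by omega⟩
  rw [List.range_succ_eq_map]
  simp only [List.map_cons, List.map_map, Nat.zero_mul, List.drop_zero]
  -- heads and tails
  have htake1 : g.take (r + 1) ≠ [] := by
    apply List.ne_nil_of_length_pos
    simp only [List.length_take, ← hn]
    omega
  have hhead : maxL (ys.take t) = pvMaxOf (PySem.List.slice g none (some ((r : Int) + (t : Int)))) := by
    have : ((r : Int) + (t : Int)) = (((r + t : Nat) : Nat) : Int) := by push_cast; ring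
    rw [this, PySem.List.slice_to_natCast]
    rw [pvMaxOf_eq_maxL _ (by
      apply List.ne_nil_of_length_pos
      simp only [List.length_take, ← hn]
      omega)]
    rw [hys]
    rw [show t = (t - 1) + 1 by omega]
    rw [List.take_succ_cons]
    rw [maxL_cons_maxL _ _ htake1]
    rw [← List.take_add]
    congr 2
    omega
  refine congrArg₂ List.cons hhead ?_
  -- tail
  have hrange : PySem.List.pyRange 1 ((pm + 1 : Nat) : Int) 1 =
      (List.range pm).map (fun k => (1 : Int) + (k : Nat)) := by
    rw [PySem.List.pyRange_one]
    have h9 : ((pm + 1 : Nat) : Int) - 1 = (pm : Int) := by push_cast; ring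
    rw [h9, Int.toNat_natCast]
  rw [hrange, List.map_map]
  apply List.map_congr_left
  intro i hi
  have hipm : i < pm := List.mem_range.mp hi
  simp only [Function.comp_apply]
  -- A-side element
  have hdropA : ys.drop ((i + 1) * t) = g.drop (r + (i + 1) * t) := by
    rw [hys]
    obtain ⟨u, hu⟩ : ∃ u, (i + 1) * t = u + 1 := ⟨(i + 1) * t - 1, by
      have : 1 * 1 ≤ (i + 1) * t := Nat.mul_le_mul (by omega) ht1
      omega⟩
    rw [hu, List.drop_succ_cons, List.drop_drop]
    congr 1
    omega
  -- B-side element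
  have hcast1 : ((r : Int) + ((1 : Int) + (i : Nat)) * (t : Int)) = (((r + (i + 1) * t : Nat)) : Int) := by
    push_cast; ring
  have hcast2 : ((r : Int) + (((1 : Int) + (i : Nat)) + 1) * (t : Int)) =
      (((r + (i + 1) * t : Nat)) : Int) + ((t : Nat) : Int) := by
    push_cast; ring
  rw [hcast1, hcast2, PySem.List.slice_natCast_add]
  have hne2 : (g.drop (r + (i + 1) * t)).take t ≠ [] := by
    apply List.ne_nil_of_length_pos
    simp only [List.length_take, List.length_drop, ← hn]
    have hmul : (i + 2) * t ≤ (pm + 1) * t := Nat.mul_le_mul_right t (by omega)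
    have hexp : (i + 2) * t = (i + 1) * t + t := by ring
    have hdm' := hdm
    generalize (i + 1) * t = a at hmul hexp ⊢
    generalize (pm + 1) * t = b at hmul hdm' ⊢
    omega
  rw [pvMaxOf_eq_maxL _ hne2, hdropA]

theorem torneo_spec : Claim_equal_torneo := by
  intro genes p hdom hpre
  unfold Spec_torneo
  rcases hpre with hp | ⟨rfl, rfl⟩
  · lift p to Nat using (by omega : (0:Int) ≤ p) with pn
    by_cases hle : (genes.length : Int) ≤ (pn : Int)
    · rw [torneo, pvOuter_stop _ _ (by omega), torneo_alt]
      simp only [hle, if_pos]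
    · exact torneo_core genes pn (by exact_mod_cast hp) (by omega)
  · rw [torneo, pvOuter_stop _ _ (by simp), torneo_alt]
    simp
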